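-- pv_equiv track=rewrite | github.com/vinchinzu/euler | python/878.py | inverse_poly_mod
-- ===== SOURCE A (Python) =====
-- Poly = int
--
-- def poly_deg(a: Poly) -> int:
--     """Return the degree of polynomial a represented as an integer."""
--     return a.bit_length() - 1 if a > 0 else -1
--
-- def poly_mul(a: Poly, b: Poly) -> Poly:
--     res = 0
--     while b > 0:
--         if b & 1:
--             res ^= a
--         a <<= 1
--         b >>= 1
--     return res
--
-- def poly_divmod(a: Poly, b: Poly) -> tuple[Poly, Poly]:
--     if b == 0:
--         raise ValueError("Division by zero")
--     da = poly_deg(a)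
--     db = poly_deg(b)
--     if da < db:
--         return 0, a
--
--     q = 0
--     while da >= db:
--         shift = da - db
--         q ^= 1 << shift
--         a ^= b << shift
--         da = poly_deg(a)
--     return q, a
--
-- def inverse_poly_mod(a: Poly, m: Poly) -> Poly:
--     t, newt = 0, 1
--     r, newr = m, a
--     while newr != 0:
--         q, _ = poly_divmod(r, newr)
--         t, newt = newt, t ^ poly_mul(q, newt)
--         r, newr = newr, r ^ poly_mul(q, newr)
--
--     if poly_deg(r) > 0:
--         raise ValueError("Not invertible")
--     return t
-- ===== SOURCE B (Python) =====
-- def inverse_poly_mod(a, m):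
--     t, newt = 0, 1
--     r, newr = m, a
--     while newr != 0:
--         nb = newr.bit_length()
--         rem, acc = r, 0
--         while rem.bit_length() >= nb:
--             shift = rem.bit_length() - nb
--             rem ^= newr << shift
--             acc ^= newt << shift
--         t, newt = newt, t ^ acc
--         r, newr = newr, rem
--     if r > 1:
--         raise ValueError("Not invertible")
--     return t
-- ===== Notes on version B (the rewrite author's own statement) =====
-- stated objective: alternative
-- what changed: The separate poly_divmod (compute quotient q) and two poly_mul(q, .) calls per Euclid step are replaced by one fused bit-by-bit long division that xors newr<<shift into the remainder and newt<<shift into the Bezout accumulator simultaneously, so no quotient is ever materialised or multiplied.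
import Mathlib
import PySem

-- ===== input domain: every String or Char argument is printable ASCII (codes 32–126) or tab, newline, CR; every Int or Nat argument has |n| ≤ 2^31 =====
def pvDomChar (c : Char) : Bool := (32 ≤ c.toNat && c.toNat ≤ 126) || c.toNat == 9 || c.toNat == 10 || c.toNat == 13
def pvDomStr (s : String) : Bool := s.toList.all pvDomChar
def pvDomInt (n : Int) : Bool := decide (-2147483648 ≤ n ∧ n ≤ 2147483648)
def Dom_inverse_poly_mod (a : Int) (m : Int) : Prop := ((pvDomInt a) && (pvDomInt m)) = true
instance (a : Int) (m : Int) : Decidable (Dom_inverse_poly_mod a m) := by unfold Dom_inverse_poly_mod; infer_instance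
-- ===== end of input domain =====

-- B fuses the extended-Euclid coefficient update into one bit-by-bit long division
-- (no quotient is materialised, no poly_mul calls): a different decomposition of each step.
-- Within Pre_ both inputs are handled as the nonnegative integers Python sees, so the
-- ports work on `Int.toNat` of the arguments (exact there: Pre_ admits only 0 ≤ a,
-- 0 ≤ m — plus a = 0 ∧ m < 0, where both Pythons skip the loop and return 0, which is
-- what the Nat code computes as well since (Int.toNat m) = 0 behaves identically).

-- ===== PORT A =====
-- poly_deg: bit_length - 1 for positive, -1 otherwise (Nat.size = Python bit_length on Nat)
def pvPolyDeg (a : Nat) : Int := if 0 < a then (Nat.size a : Int) - 1 else -1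

-- poly_mul's while loop over b, with its accumulator res
def pvPolyMulGo (a b res : Nat) : Nat :=
  if b = 0 then res
  else pvPolyMulGo (a <<< 1) (b >>> 1) (if b &&& 1 = 1 then res ^^^ a else res)
termination_by b
decreasing_by simp [Nat.shiftRight_one]; omega

def pvPolyMul (a b : Nat) : Nat := pvPolyMulGo a b 0

-- poly_divmod's while loop; the fuel (Nat.size of the initial dividend + 1) only makes it
-- total: each real iteration cancels the top bit of a, so it never runs out when 0 < b
def pvDivGo : Nat → Nat → Nat → Nat → Nat × Nat
  | 0, _, q, a => (q, a)
  | fuel + 1, b, q, a =>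
    if pvPolyDeg b ≤ pvPolyDeg a then
      pvDivGo fuel b (q ^^^ (1 <<< (pvPolyDeg a - pvPolyDeg b).toNat))
        (a ^^^ (b <<< (pvPolyDeg a - pvPolyDeg b).toNat))
    else (q, a)

def pvPolyDivmod (a b : Nat) : Nat × Nat :=
  if pvPolyDeg a < pvPolyDeg b then (0, a) else pvDivGo (Nat.size a + 1) b 0 a

-- the main while loop; fuel size a + size m + 2 bounds the iteration count (deg newr
-- strictly decreases after the possible initial swap), again only for totality
def pvLoopA : Nat → Nat → Nat → Nat → Nat → Nat
  | 0, t, _, _, _ => t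
  | fuel + 1, t, newt, r, newr =>
    if newr ≠ 0 then
      pvLoopA fuel newt (t ^^^ pvPolyMul (pvPolyDivmod r newr).1 newt) newr
        (r ^^^ pvPolyMul (pvPolyDivmod r newr).1 newr)
    else if 0 < pvPolyDeg r then 0 else t  -- Python raises ValueError here (outside Pre_)

def inverse_poly_mod (a : Int) (m : Int) : Int :=
  ((pvLoopA (Nat.size a.toNat + Nat.size m.toNat + 2) 0 1 m.toNat a.toNat : Nat) : Int)

-- ===== PORT B =====
-- fused long division: xor newr<<shift into the remainder and newt<<shift into the
-- Bezout accumulator; fuel (size of the initial remainder + 1) is for totality only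
def altDivGo : Nat → Nat → Nat → Nat → Nat → Nat × Nat
  | 0, _, _, rem, acc => (rem, acc)
  | fuel + 1, newr, newt, rem, acc =>
    if Nat.size newr ≤ Nat.size rem then
      altDivGo fuel newr newt (rem ^^^ (newr <<< (Nat.size rem - Nat.size newr)))
        (acc ^^^ (newt <<< (Nat.size rem - Nat.size newr)))
    else (rem, acc)

def altLoop : Nat → Nat → Nat → Nat → Nat → Nat
  | 0, t, _, _, _ => t
  | fuel + 1, t, newt, r, newr =>
    if newr ≠ 0 then
      altLoop fuel newt (t ^^^ (altDivGo (Nat.size r + 1) newr newt r 0).2) newr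
        (altDivGo (Nat.size r + 1) newr newt r 0).1
    else if 1 < r then 0 else t  -- Python raises ValueError here (outside Pre_)

def inverse_poly_mod_alt (a : Int) (m : Int) : Int :=
  ((altLoop (Nat.size a.toNat + Nat.size m.toNat + 2) 0 1 m.toNat a.toNat : Nat) : Int)

-- ===== PRECONDITION & SPEC =====
-- GF(2) polynomial gcd used only to STATE invertibility (independent of both ports);
-- the fuel bounds always suffice, so these compute the mathematical poly-mod and poly-gcd.
def pvPreModGo : Nat → Nat → Nat → Nat
  | 0, x, _ => x
  | f + 1, x, y =>
    pvPreModGo f (if y ≠ 0 ∧ Nat.size y ≤ Nat.size x then x ^^^ (y <<< (Nat.size x - Nat.size y)) else x) y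

def pvPreMod (x y : Nat) : Nat := pvPreModGo (Nat.size x) x y

def pvPreGcdGo : Nat → Nat → Nat → Nat
  | 0, x, _ => x
  | f + 1, x, y => if y = 0 then x else pvPreGcdGo f y (pvPreMod x y)

def pvPreGcd (x y : Nat) : Nat := pvPreGcdGo (Nat.size x + Nat.size y + 2) x y

-- Exactly where the Python A returns normally: nonnegative inputs whose GF(2) gcd is a
-- unit (else A raises ValueError; negative inputs make A loop forever), plus the
-- degenerate a = 0 ∧ m < 0 corner where A happens to return 0 without touching m's bits.
def Pre_inverse_poly_mod (a : Int) (m : Int) : Prop :=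
  (0 ≤ a ∧ 0 ≤ m ∧ pvPreGcd m.toNat a.toNat ≤ 1) ∨ (a = 0 ∧ m < 0)
instance (a : Int) (m : Int) : Decidable (Pre_inverse_poly_mod a m) := by
  unfold Pre_inverse_poly_mod; infer_instance

def pvWitness_inverse_poly_mod : Int × Int := (2, 7)

def Spec_inverse_poly_mod (a : Int) (m : Int) (out : Int) : Prop := out = inverse_poly_mod_alt a m
instance (a : Int) (m : Int) (out : Int) : Decidable (Spec_inverse_poly_mod a m out) := by
  unfold Spec_inverse_poly_mod; infer_instance

-- ===== CLAIM (what is proved, stated in full; the proofs are below) =====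
def Claim_equal_inverse_poly_mod : Prop := ∀ (a : Int) (m : Int), Dom_inverse_poly_mod a m → Pre_inverse_poly_mod a m → Spec_inverse_poly_mod a m (inverse_poly_mod a m)

-- ===== LEMMAS AND PROOFS =====

theorem pv_shiftLeft_xor (x y k : Nat) : (x ^^^ y) <<< k = (x <<< k) ^^^ (y <<< k) := by
  apply Nat.eq_of_testBit_eq
  intro i
  simp [Nat.testBit_shiftLeft, Nat.testBit_xor]
  by_cases h : k ≤ i <;> simp [h]

theorem pv_mulGo_res (b : Nat) : ∀ a res, pvPolyMulGo a b res = res ^^^ pvPolyMulGo a b 0 := by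
  induction b using Nat.strong_induction_on with
  | _ b ih =>
    intro a res
    conv_lhs => rw [pvPolyMulGo]
    conv_rhs => rw [pvPolyMulGo]
    by_cases hb : b = 0
    · simp [hb]
    · have hlt : b >>> 1 < b := by simp [Nat.shiftRight_one]; omega
      simp only [hb, ite_false]
      rw [ih _ hlt (a <<< 1) (if b &&& 1 = 1 then res ^^^ a else res),
          ih _ hlt (a <<< 1) (if b &&& 1 = 1 then 0 ^^^ a else 0)]
      rcases Nat.mod_two_eq_zero_or_one b with h | h <;>
        simp [Nat.and_one_is_mod, h, Nat.xor_assoc]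

theorem pv_mul_unfold (a b : Nat) :
    pvPolyMul a b = if b = 0 then 0 else (if b &&& 1 = 1 then a else 0) ^^^ pvPolyMul (a <<< 1) (b >>> 1) := by
  unfold pvPolyMul
  rw [pvPolyMulGo]
  by_cases hb : b = 0
  · simp [hb]
  · simp only [hb, ite_false]
    rw [pv_mulGo_res]
    by_cases ho : b &&& 1 = 1 <;> simp [ho]

theorem pv_mul_zero (b : Nat) : pvPolyMul 0 b = 0 := by
  induction b using Nat.strong_induction_on with
  | _ b ih =>
    rw [pv_mul_unfold]
    by_cases hb : b = 0
    · simp [hb]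
    · have hlt : b >>> 1 < b := by simp [Nat.shiftRight_one]; omega
      simp [hb, Nat.zero_shiftLeft, ih _ hlt]

theorem pv_mul_xor (b : Nat) : ∀ x y, pvPolyMul (x ^^^ y) b = pvPolyMul x b ^^^ pvPolyMul y b := by
  induction b using Nat.strong_induction_on with
  | _ b ih =>
    intro x y
    rw [pv_mul_unfold, pv_mul_unfold x, pv_mul_unfold y]
    by_cases hb : b = 0
    · simp [hb]
    · have hlt : b >>> 1 < b := by simp [Nat.shiftRight_one]; omega
      simp only [hb, ite_false]
      rw [pv_shiftLeft_xor, ih _ hlt]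
      rcases Nat.mod_two_eq_zero_or_one b with h | h <;>
        simp [Nat.and_one_is_mod, h, Nat.xor_assoc, Nat.xor_comm, Nat.xor_left_comm]

theorem pv_mul_shift (b : Nat) : ∀ x k, pvPolyMul (x <<< k) b = (pvPolyMul x b) <<< k := by
  induction b using Nat.strong_induction_on with
  | _ b ih =>
    intro x k
    rw [pv_mul_unfold, pv_mul_unfold x]
    by_cases hb : b = 0
    · simp [hb]
    · have hlt : b >>> 1 < b := by simp [Nat.shiftRight_one]; omega
      have hc : x <<< k <<< 1 = x <<< 1 <<< k := by
        simp [Nat.shiftLeft_eq]; ring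
      simp only [hb, ite_false]
      rw [hc, ih _ hlt, pv_shiftLeft_xor]
      rcases Nat.mod_two_eq_zero_or_one b with h | h <;>
        simp [Nat.and_one_is_mod, h, Nat.zero_shiftLeft]

theorem pv_two_mul_xor_one (k : Nat) : (2 * k) ^^^ 1 = 2 * k + 1 := by
  apply Nat.eq_of_testBit_eq
  intro i
  cases i with
  | zero => simp [Nat.testBit_zero]
  | succ j => simp [Nat.testBit_succ]

theorem pv_mul_one (b : Nat) : pvPolyMul 1 b = b := by
  induction b using Nat.strong_induction_on with
  | _ b ih =>
    rw [pv_mul_unfold]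
    by_cases hb : b = 0
    · simp [hb]
    · have hlt : b >>> 1 < b := by simp [Nat.shiftRight_one]; omega
      simp only [hb, ite_false]
      rw [pv_mul_shift, ih _ hlt]
      have h1 : (b >>> 1) <<< 1 = 2 * (b / 2) := by
        rw [Nat.shiftRight_one, Nat.shiftLeft_eq]; ring
      rw [h1, Nat.and_one_is_mod]
      rcases Nat.mod_two_eq_zero_or_one b with h | h
      · simp [h]; omega
      · simp only [h, ite_true]
        rw [Nat.xor_comm, pv_two_mul_xor_one]; omega

theorem pv_mul_pow (s b : Nat) : pvPolyMul (1 <<< s) b = b <<< s := by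
  rw [pv_mul_shift, pv_mul_one]

-- A's division loop tracks a = a₀ ^^^ (q accumulated so far) * b
theorem pv_divGo_snd (fuel : Nat) : ∀ b q a,
    (pvDivGo fuel b q a).2 = a ^^^ pvPolyMul ((pvDivGo fuel b q a).1 ^^^ q) b := by
  induction fuel with
  | zero => intro b q a; simp [pvDivGo, pv_mul_zero]
  | succ fuel ih =>
    intro b q a
    rw [pvDivGo]
    by_cases hc : pvPolyDeg b ≤ pvPolyDeg a
    · simp only [hc, ite_true]
      rw [ih]
      have hq : (pvDivGo fuel b (q ^^^ 1 <<< (pvPolyDeg a - pvPolyDeg b).toNat)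
          (a ^^^ b <<< (pvPolyDeg a - pvPolyDeg b).toNat)).1 ^^^
          (q ^^^ 1 <<< (pvPolyDeg a - pvPolyDeg b).toNat)
          = ((pvDivGo fuel b (q ^^^ 1 <<< (pvPolyDeg a - pvPolyDeg b).toNat)
              (a ^^^ b <<< (pvPolyDeg a - pvPolyDeg b).toNat)).1 ^^^ q) ^^^
            1 <<< (pvPolyDeg a - pvPolyDeg b).toNat := by
        simp [Nat.xor_assoc, Nat.xor_comm, Nat.xor_left_comm]
      rw [hq, pv_mul_xor, pv_mul_pow]
      simp [Nat.xor_assoc, Nat.xor_comm, Nat.xor_left_comm]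
    · simp [hc, pv_mul_zero]

-- condition and shift of the two inner loops coincide when the divisor is nonzero
theorem pv_cond_iff (a b : Nat) (hb : 0 < b) :
    (pvPolyDeg b ≤ pvPolyDeg a ↔ Nat.size b ≤ Nat.size a) := by
  unfold pvPolyDeg
  have hsb : 0 < Nat.size b := Nat.size_pos.mpr hb
  by_cases ha : 0 < a
  · have hsa : 0 < Nat.size a := Nat.size_pos.mpr ha
    simp [ha, hb]
  · have ha0 : a = 0 := by omega
    have : Nat.size a = 0 := by simp [ha0]
    simp [ha, hb]; omega

theorem pv_shift_eq (a b : Nat) (hb : 0 < b) (h : pvPolyDeg b ≤ pvPolyDeg a) :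
    (pvPolyDeg a - pvPolyDeg b).toNat = Nat.size a - Nat.size b := by
  unfold pvPolyDeg at *
  have hsb : 0 < Nat.size b := Nat.size_pos.mpr hb
  by_cases ha : 0 < a
  · simp [ha, hb] at *
  · simp [ha, hb] at h; omega

-- B's fused loop = A's division loop + multiplication by the accumulated quotient
theorem pv_inner (fuel : Nat) : ∀ b newt a acc q, 0 < b →
    altDivGo fuel b newt a acc
      = ((pvDivGo fuel b q a).2, acc ^^^ pvPolyMul ((pvDivGo fuel b q a).1 ^^^ q) newt) := by
  induction fuel with
  | zero => intro b newt a acc q hb; simp [altDivGo, pvDivGo, pv_mul_zero]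
  | succ fuel ih =>
    intro b newt a acc q hb
    rw [altDivGo, pvDivGo]
    by_cases hc : pvPolyDeg b ≤ pvPolyDeg a
    · have hc' : Nat.size b ≤ Nat.size a := (pv_cond_iff a b hb).mp hc
      have hs := pv_shift_eq a b hb hc
      simp only [hc, hc', ite_true]
      rw [hs, ih b newt _ _ (q ^^^ 1 <<< (Nat.size a - Nat.size b)) hb]
      rw [← hs]
      have hq : (pvDivGo fuel b (q ^^^ 1 <<< (pvPolyDeg a - pvPolyDeg b).toNat)
          (a ^^^ b <<< (pvPolyDeg a - pvPolyDeg b).toNat)).1 ^^^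
          (q ^^^ 1 <<< (pvPolyDeg a - pvPolyDeg b).toNat)
          = ((pvDivGo fuel b (q ^^^ 1 <<< (pvPolyDeg a - pvPolyDeg b).toNat)
              (a ^^^ b <<< (pvPolyDeg a - pvPolyDeg b).toNat)).1 ^^^ q) ^^^
            1 <<< (pvPolyDeg a - pvPolyDeg b).toNat := by
        simp [Nat.xor_assoc, Nat.xor_comm, Nat.xor_left_comm]
      rw [hq, pv_mul_xor, pv_mul_pow]
      simp [Nat.xor_assoc, Nat.xor_comm, Nat.xor_left_comm]
    · have hc' : ¬ Nat.size b ≤ Nat.size a := fun h => hc ((pv_cond_iff a b hb).mpr h)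
      simp [hc, hc', pv_mul_zero]

theorem pv_divmod_eq (a b : Nat) : pvPolyDivmod a b = pvDivGo (Nat.size a + 1) b 0 a := by
  unfold pvPolyDivmod
  by_cases h : pvPolyDeg a < pvPolyDeg b
  · have hc : ¬ pvPolyDeg b ≤ pvPolyDeg a := by omega
    rw [pvDivGo]
    simp [h, hc]
  · simp [h]

theorem pv_deg_pos (r : Nat) : (0 < pvPolyDeg r) = (1 < r) := by
  unfold pvPolyDeg
  by_cases hr : 0 < r
  · have h2 : 1 < Nat.size r ↔ 2 ≤ r := by
      rw [Nat.lt_size]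
    simp [hr]; omega
  · have : r = 0 := by omega
    simp [this]

theorem pv_outer (fuel : Nat) : ∀ t newt r newr,
    pvLoopA fuel t newt r newr = altLoop fuel t newt r newr := by
  induction fuel with
  | zero => intro t newt r newr; rfl
  | succ fuel ih =>
    intro t newt r newr
    rw [pvLoopA, altLoop]
    by_cases h : newr = 0
    · simp [h, pv_deg_pos]
    · have hb : 0 < newr := Nat.pos_of_ne_zero h
      have hdiv := pv_inner (Nat.size r + 1) newr newt r 0 0 hb
      have hA := pv_divGo_snd (Nat.size r + 1) newr 0 r
      simp only [h, ne_eq, not_false_eq_true, ite_true]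
      rw [pv_divmod_eq, hdiv, hA]
      simp [ih]

-- ===== VERDICT (by name: the statement is the Claim_ definition above) =====
theorem inverse_poly_mod_spec : Claim_equal_inverse_poly_mod := by
  intro a m _ _
  unfold Spec_inverse_poly_mod inverse_poly_mod inverse_poly_mod_alt
  rw [pv_outer]
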